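-- pv_equiv track=rewrite | github.com/boris-volkov/Python | algos/permutations.py | lifted
-- ===== SOURCE A (Python) =====
-- yellow      = '\u001b[38;2;250;200;70m'
--
-- def lifted(x,a,b):
--     s = yellow
--     for i in range(len(x)):
--         if i == a or i == b:
--             s += str(hex(x[i]))[-1]
--         else:
--             s += ' '
--     return s
-- ===== SOURCE B (Python) =====
-- yellow      = '\u001b[38;2;250;200;70m'
--
-- def lifted(x, a, b):
--     body = [' '] * len(x)
--     for p in (a, b):
--         if 0 <= p < len(x):
--             body[p] = str(hex(x[p]))[-1]
--     return yellow + ''.join(body)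
-- ===== Notes on version B (the rewrite author's own statement) =====
-- stated objective: simpler
-- what changed: Instead of scanning every index and testing i==a or i==b per position, B fills a spaces buffer of length len(x) and directly patches the two marked in-range positions, then joins once.
import Mathlib
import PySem

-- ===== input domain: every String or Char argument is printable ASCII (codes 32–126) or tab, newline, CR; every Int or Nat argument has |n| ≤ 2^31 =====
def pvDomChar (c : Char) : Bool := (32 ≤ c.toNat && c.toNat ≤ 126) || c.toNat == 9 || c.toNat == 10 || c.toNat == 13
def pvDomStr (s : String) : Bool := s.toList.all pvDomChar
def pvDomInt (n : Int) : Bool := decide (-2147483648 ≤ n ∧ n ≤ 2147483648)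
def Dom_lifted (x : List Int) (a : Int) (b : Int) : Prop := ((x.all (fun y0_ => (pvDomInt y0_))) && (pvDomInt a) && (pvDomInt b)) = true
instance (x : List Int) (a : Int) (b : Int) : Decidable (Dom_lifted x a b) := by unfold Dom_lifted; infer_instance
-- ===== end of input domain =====

-- B builds the body as a spaces buffer and patches only the two marked in-range
-- positions, instead of A's per-index membership test; return values proved equal.

-- ===== PORT A =====

-- the ANSI colour prefix constant 'yellow' of the module
def pyYellow : String := "\u001b[38;2;250;200;70m"

-- str(hex(n))[-1]: Python's hex string is never empty; its last character is the
-- lowercase hex digit of |n| % 16 (for n < 0 the string is '-0x…' over |n|).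
-- Exact on all Int (Nat.digitChar gives '0'-'9','a'-'f' for 0..15).
def pyHexLast (n : Int) : Char := Nat.digitChar (n.natAbs % 16)

-- literal port of A: fold the accumulator string over range(len(x));
-- x[i] with 0 ≤ i < len x is exact as x.getD i 0.
def lifted (x : List Int) (a : Int) (b : Int) : String :=
  (List.range x.length).foldl
    (fun s (i : Nat) =>
      if (i : Int) = a ∨ (i : Int) = b then s ++ String.ofList [pyHexLast (x.getD i 0)]
      else s ++ String.ofList [' '])
    pyYellow

-- ===== PORT B =====

-- body[p] = str(hex(x[p]))[-1] guarded by 0 <= p < len(x)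
def pvPatch (x : List Int) (body : List Char) (p : Int) : List Char :=
  if 0 ≤ p ∧ p < (x.length : Int) then body.set p.toNat (pyHexLast (x.getD p.toNat 0))
  else body

def lifted_alt (x : List Int) (a : Int) (b : Int) : String :=
  pyYellow ++ String.ofList ([a, b].foldl (pvPatch x) (List.replicate x.length ' '))

-- ===== PRECONDITION & SPEC =====
def Spec_lifted (x : List Int) (a : Int) (b : Int) (out : String) : Prop := out = lifted_alt x a b
instance (x : List Int) (a : Int) (b : Int) (out : String) : Decidable (Spec_lifted x a b out) := by unfold Spec_lifted; infer_instance

-- ===== CLAIM (what is proved, stated in full; the proofs are below) =====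
def Claim_equal_lifted : Prop := ∀ (x : List Int) (a : Int) (b : Int), Dom_lifted x a b → Spec_lifted x a b (lifted x a b)

-- ===== LEMMAS AND PROOFS =====

-- the per-index character both programs place at position i
def pvCell (x : List Int) (a b : Int) (i : Nat) : Char :=
  if (i : Int) = a ∨ (i : Int) = b then pyHexLast (x.getD i 0) else ' '

theorem foldl_append_chars (g : Nat → Char) :
    ∀ (l : List Nat) (s : String),
      l.foldl (fun s i => s ++ String.ofList [g i]) s = s ++ String.ofList (l.map g) := by
  intro l
  induction l with
  | nil => intro s; apply String.ext; simp
  | cons h t ih =>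
      intro s
      simp only [List.foldl, List.map]
      rw [ih]
      apply String.ext
      simp

theorem lifted_as_map (x : List Int) (a b : Int) :
    lifted x a b = pyYellow ++ String.ofList ((List.range x.length).map (pvCell x a b)) := by
  unfold lifted
  rw [show (fun (s : String) (i : Nat) =>
      if (i : Int) = a ∨ (i : Int) = b then s ++ String.ofList [pyHexLast (x.getD i 0)]
      else s ++ String.ofList [' ']) = fun s i => s ++ String.ofList [pvCell x a b i] by
    funext s i; unfold pvCell; split_ifs <;> rfl]
  exact foldl_append_chars _ _ _

theorem length_pvPatch (x : List Int) (p : Int) (l : List Char) :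
    (pvPatch x l p).length = l.length := by
  unfold pvPatch; split_ifs <;> simp

theorem getElem_pvPatch (x : List Int) (p : Int) (l : List Char) (i : Nat)
    (hl : l.length = x.length) (hi : i < l.length) :
    (pvPatch x l p)[i]'(by rw [length_pvPatch]; exact hi)
      = if (i : Int) = p then pyHexLast (x.getD i 0) else l[i] := by
  unfold pvPatch
  by_cases hp : 0 ≤ p ∧ p < (x.length : Int)
  · simp only [hp, if_true, and_self, List.getElem_set]
    by_cases hip : (i : Int) = p
    · rw [if_pos (by omega), if_pos hip]
      congr 2
      omega
    · rw [if_neg (by omega), if_neg hip]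
  · have hip : ¬ ((i : Int) = p) := by omega
    simp only [hp, hip, if_false]

theorem patch_body_eq (x : List Int) (a b : Int) :
    [a, b].foldl (pvPatch x) (List.replicate x.length ' ')
      = (List.range x.length).map (pvCell x a b) := by
  have hlen1 : (pvPatch x (List.replicate x.length ' ') a).length = x.length := by
    rw [length_pvPatch, List.length_replicate]
  apply List.ext_getElem
  · simp [List.foldl, length_pvPatch]
  · intro i h1 h2
    have hi : i < x.length := by simpa using h2
    simp only [List.foldl, List.getElem_map, List.getElem_range]
    rw [getElem_pvPatch x b _ i (by rw [hlen1]) (by rw [hlen1]; exact hi),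
        getElem_pvPatch x a _ i (by simp) (by simp [hi]),
        List.getElem_replicate]
    unfold pvCell
    by_cases hia : (i : Int) = a <;> by_cases hib : (i : Int) = b <;>
      simp [hia, hib]

-- ===== VERDICT (by name: the statement is the Claim_ definition above) =====
theorem lifted_spec : Claim_equal_lifted := by
  intro x a b _
  unfold Spec_lifted lifted_alt
  rw [lifted_as_map, patch_body_eq]
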